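-- pv_equiv track=rewrite | github.com/renatogoersch/AOC2024 | DAY2/main.py | only_decreasing
-- ===== SOURCE A (Python) =====
-- def only_decreasing(values: list, removed=False):
--     for i in range(len(values)-1):
--         dif = values[i] - values[i+1]
--         if (dif < 1) or (dif > 3):
--             if removed:
--                 return False
--             else:
--                 new_values = values[:i + 1] + values[i + 2:]
--                 if only_decreasing(new_values, removed=True):
--                     return True
--                 new_values = values[:i] + values[i + 1:]
--                 if only_decreasing(new_values, removed=True):
--                     return True
--                 return False
--     return True
-- ===== SOURCE B (Python) =====
-- def only_decreasing(values: list, removed=False):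
--     # Brute force: a report is safe iff it is already strictly decreasing by 1..3,
--     # or (when a removal is still allowed) some single removal makes it so.
--     # Removing any index other than the two around the FIRST violation can never
--     # help (the violating adjacent pair survives the removal), so this agrees
--     # with the first-violation strategy while being far simpler to state.
--     def valid(vs):
--         return all(1 <= a - b <= 3 for a, b in zip(vs, vs[1:]))
--
--     if valid(values):
--         return True
--     if removed:
--         return False
--     return any(valid(values[:j] + values[j + 1:]) for j in range(len(values)))
-- ===== Notes on version B (the rewrite author's own statement) =====
-- stated objective: alternative
-- what changed: Replaces A's first-violation strategy (recursive re-entry with removed=True trying only the two indices around the first bad pair) by a flat brute force: one validity scan, then try deleting EVERY index; equivalent because a removal away from the first violating pair leaves that pair adjacent, but B trades A's O(n) for O(n^2).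
import Mathlib
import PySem

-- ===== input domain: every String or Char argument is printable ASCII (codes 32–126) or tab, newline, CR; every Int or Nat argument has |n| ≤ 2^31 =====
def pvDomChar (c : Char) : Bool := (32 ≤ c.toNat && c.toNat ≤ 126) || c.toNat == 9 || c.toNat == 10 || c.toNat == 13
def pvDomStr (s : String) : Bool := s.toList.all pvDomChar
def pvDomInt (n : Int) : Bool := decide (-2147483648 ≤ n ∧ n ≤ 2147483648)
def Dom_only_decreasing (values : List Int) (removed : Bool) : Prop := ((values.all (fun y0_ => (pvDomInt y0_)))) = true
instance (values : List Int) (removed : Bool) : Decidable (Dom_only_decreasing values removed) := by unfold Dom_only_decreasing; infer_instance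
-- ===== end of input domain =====

-- B replaces A's first-violation strategy (recursive re-entry with removed=True on the two
-- candidate deletions) by a flat brute force trying EVERY single deletion; alternative, not faster.


-- ===== PORT A =====
-- A's for-loop over range(len(values)-1) with the recursive self-call; indices i, i+1 are
-- always in range (i < len-1), so pyGetD is exact here.
def odGo (values : List Int) (removed : Bool) (i : Nat) : Bool :=
  if h : i < values.length - 1 then
    let dif := PySem.List.pyGetD values (i : Int) 0 - PySem.List.pyGetD values ((i : Int) + 1) 0
    if dif < 1 ∨ dif > 3 then
      if removed then false
      else
        let nv1 := PySem.List.slice values none (some ((i : Int) + 1)) ++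
                   PySem.List.slice values (some ((i : Int) + 2)) none
        if odGo nv1 true 0 then true
        else
          let nv2 := PySem.List.slice values none (some (i : Int)) ++
                     PySem.List.slice values (some ((i : Int) + 1)) none
          if odGo nv2 true 0 then true
          else false
    else
      odGo values removed (i + 1)
  else true
termination_by ((if removed then 0 else 1 : Nat), values.length - 1 - i)
decreasing_by
  · apply Prod.Lex.left; simp_all
  · apply Prod.Lex.left; simp_all
  · apply Prod.Lex.right; omega

def only_decreasing (values : List Int) (removed : Bool) : Bool :=
  odGo values removed 0

-- ===== PORT B =====
-- B's helper valid(vs) = all(1 <= a-b <= 3 for a, b in zip(vs, vs[1:]))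
def bValid (vs : List Int) : Bool :=
  (vs.zip vs.tail).all (fun p => decide (1 ≤ p.1 - p.2 ∧ p.1 - p.2 ≤ 3))

-- the candidate values[:j] + values[j+1:]
def bRemove (vs : List Int) (j : Nat) : List Int :=
  PySem.List.slice vs none (some (j : Int)) ++ PySem.List.slice vs (some ((j : Int) + 1)) none

def only_decreasing_alt (values : List Int) (removed : Bool) : Bool :=
  if bValid values then true
  else if removed then false
  else (List.range values.length).any (fun j => bValid (bRemove values j))

-- ===== PRECONDITION & SPEC =====
def Spec_only_decreasing (values : List Int) (removed : Bool) (out : Bool) : Prop := out = only_decreasing_alt values removed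
instance (values : List Int) (removed : Bool) (out : Bool) : Decidable (Spec_only_decreasing values removed out) := by unfold Spec_only_decreasing; infer_instance

-- ===== CLAIM (what is proved, stated in full; the proofs are below) =====
def Claim_equal_only_decreasing : Prop := ∀ (values : List Int) (removed : Bool), Dom_only_decreasing values removed → Spec_only_decreasing values removed (only_decreasing values removed)

-- ===== LEMMAS AND PROOFS =====

def bBad (p : Int × Int) : Bool := !(decide (1 ≤ p.1 - p.2 ∧ p.1 - p.2 ≤ 3))

-- the two removal candidates A builds around index j (proof-side abbreviations)
def pvC1 (vs : List Int) (j : Nat) : List Int :=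
  PySem.List.slice vs none (some ((j : Int) + 1)) ++ PySem.List.slice vs (some ((j : Int) + 2)) none
def pvC2 (vs : List Int) (j : Nat) : List Int :=
  PySem.List.slice vs none (some (j : Int)) ++ PySem.List.slice vs (some ((j : Int) + 1)) none

lemma all_eq_findIdx_isNone (l : List (Int × Int)) :
    l.all (fun p => decide (1 ≤ p.1 - p.2 ∧ p.1 - p.2 ≤ 3)) = (l.findIdx? bBad).isNone := by
  induction l with
  | nil => simp
  | cons p t ih =>
    rw [List.all_cons, List.findIdx?_cons]
    by_cases hb : (1 ≤ p.1 - p.2 ∧ p.1 - p.2 ≤ 3)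
    · have h1 : bBad p = false := by simp [bBad, hb]
      have h2 : decide (1 ≤ p.1 - p.2 ∧ p.1 - p.2 ≤ 3) = true := by simp [hb]
      rw [h1, h2, Bool.true_and, if_neg (by simp), ih]
      cases t.findIdx? bBad <;> simp
    · have h1 : bBad p = true := by simp [bBad]; omega
      have h2 : decide (1 ≤ p.1 - p.2 ∧ p.1 - p.2 ≤ 3) = false := by simp; omega
      rw [h1, h2]
      simp

lemma zip_tail_length (vs : List Int) : (vs.zip vs.tail).length = vs.length - 1 := by
  cases vs <;> simp

lemma zip_tail_getElem (vs : List Int) (k : Nat) (h : k < (vs.zip vs.tail).length) :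
    (vs.zip vs.tail)[k] =
      (vs[k]'(by rw [zip_tail_length] at h; omega),
       vs[k+1]'(by rw [zip_tail_length] at h; omega)) := by
  rw [List.getElem_zip]
  congr 1
  rw [List.getElem_tail]

lemma zip_drop_cons (vs : List Int) (i : Nat) (h : i < vs.length - 1) :
    (vs.zip vs.tail).drop i =
      (vs[i]'(by omega), vs[i+1]'(by omega)) :: (vs.zip vs.tail).drop (i+1) := by
  have hz : i < (vs.zip vs.tail).length := by rw [zip_tail_length]; omega
  rw [List.drop_eq_getElem_cons hz]
  congr 1
  exact zip_tail_getElem vs i hz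

lemma pyGetD_pair (vs : List Int) (i : Nat) (h : i < vs.length - 1) :
    PySem.List.pyGetD vs (i : Int) 0 = vs[i]'(by omega) ∧
    PySem.List.pyGetD vs ((i : Int) + 1) 0 = vs[i+1]'(by omega) := by
  constructor
  · rw [PySem.List.pyGetD_natCast, List.getD_eq_getElem?_getD, List.getElem?_eq_getElem (by omega)]
    rfl
  · have hc : ((i : Int) + 1) = ((i + 1 : Nat) : Int) := by push_cast; ring
    rw [hc, PySem.List.pyGetD_natCast, List.getD_eq_getElem?_getD,
        List.getElem?_eq_getElem (by omega)]
    rfl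

lemma odGo_true_eq (vs : List Int) :
    ∀ n i, vs.length - 1 - i = n →
      odGo vs true i = (((vs.zip vs.tail).drop i).findIdx? bBad).isNone := by
  intro n
  induction n with
  | zero =>
    intro i hi
    have h : ¬ i < vs.length - 1 := by omega
    rw [odGo]
    simp only [h, dite_false]
    have : (vs.zip vs.tail).drop i = [] := by
      apply List.drop_eq_nil_of_le; rw [zip_tail_length]; omega
    simp [this]
  | succ n ih =>
    intro i hi
    have h : i < vs.length - 1 := by omega
    obtain ⟨h1, h2⟩ := pyGetD_pair vs i h
    rw [odGo]
    simp only [h, dite_true, h1, h2]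
    rw [zip_drop_cons vs i h, List.findIdx?_cons]
    by_cases hb : (1 ≤ vs[i]'(by omega) - vs[i+1]'(by omega) ∧
                   vs[i]'(by omega) - vs[i+1]'(by omega) ≤ 3)
    · have hB : bBad (vs[i]'(by omega), vs[i+1]'(by omega)) = false := by simp [bBad, hb]
      rw [if_neg (by omega), hB, if_neg (by simp), ih (i+1) (by omega)]
      cases ((vs.zip vs.tail).drop (i+1)).findIdx? bBad <;> simp
    · have hB : bBad (vs[i]'(by omega), vs[i+1]'(by omega)) = true := by simp [bBad]; omega
      rw [if_pos (by omega), hB, if_pos rfl]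
      rfl

lemma bValid_eq_odGo (vs : List Int) : odGo vs true 0 = bValid vs := by
  rw [odGo_true_eq vs (vs.length - 1 - 0) 0 rfl]
  simp only [List.drop_zero]
  rw [bValid, all_eq_findIdx_isNone]

lemma odGo_false_eq (vs : List Int) :
    ∀ n i, vs.length - 1 - i = n →
      odGo vs false i =
        (match ((vs.zip vs.tail).drop i).findIdx? bBad with
         | none => true
         | some k => bValid (pvC1 vs (i + k)) || bValid (pvC2 vs (i + k))) := by
  intro n
  induction n with
  | zero =>
    intro i hi
    have h : ¬ i < vs.length - 1 := by omega
    rw [odGo]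
    simp only [h, dite_false]
    have : (vs.zip vs.tail).drop i = [] := by
      apply List.drop_eq_nil_of_le; rw [zip_tail_length]; omega
    simp [this]
  | succ n ih =>
    intro i hi
    have h : i < vs.length - 1 := by omega
    obtain ⟨h1, h2⟩ := pyGetD_pair vs i h
    rw [odGo]
    simp only [h, dite_true, h1, h2]
    rw [zip_drop_cons vs i h, List.findIdx?_cons]
    by_cases hb : (1 ≤ vs[i]'(by omega) - vs[i+1]'(by omega) ∧
                   vs[i]'(by omega) - vs[i+1]'(by omega) ≤ 3)
    · have hB : bBad (vs[i]'(by omega), vs[i+1]'(by omega)) = false := by simp [bBad, hb]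
      rw [if_neg (by omega), hB, if_neg (by simp), ih (i+1) (by omega)]
      cases hf : ((vs.zip vs.tail).drop (i+1)).findIdx? bBad with
      | none => simp
      | some k =>
        have hik : i + 1 + k = i + (k + 1) := by omega
        simp only [Option.map_some, hik]
    · have hB : bBad (vs[i]'(by omega), vs[i+1]'(by omega)) = true := by simp [bBad]; omega
      rw [if_pos (by omega), hB, if_pos rfl, if_neg (by simp)]
      have c1eq : (PySem.List.slice vs none (some ((i : Int) + 1)) ++
                   PySem.List.slice vs (some ((i : Int) + 2)) none) = pvC1 vs i := rfl
      have c2eq : (PySem.List.slice vs none (some (i : Int)) ++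
                   PySem.List.slice vs (some ((i : Int) + 1)) none) = pvC2 vs i := rfl
      rw [c1eq, c2eq, bValid_eq_odGo (pvC1 vs i), bValid_eq_odGo (pvC2 vs i)]
      cases hc1 : bValid (pvC1 vs i) <;> cases hc2 : bValid (pvC2 vs i) <;> simp [hc1, hc2]

-- B's candidate is eraseIdx
lemma bRemove_eq_eraseIdx (vs : List Int) (j : Nat) : bRemove vs j = vs.eraseIdx j := by
  have hc : ((j : Int) + 1) = ((j + 1 : Nat) : Int) := by push_cast; ring
  rw [bRemove, PySem.List.slice_to_natCast, hc, PySem.List.slice_from_natCast,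
      List.eraseIdx_eq_take_drop_succ]

lemma pvC1_eq_eraseIdx (vs : List Int) (i : Nat) : pvC1 vs i = vs.eraseIdx (i + 1) := by
  have h1 : ((i : Int) + 1) = ((i + 1 : Nat) : Int) := by push_cast; ring
  have h2 : ((i : Int) + 2) = ((i + 2 : Nat) : Int) := by push_cast; ring
  rw [pvC1, h1, h2, PySem.List.slice_to_natCast, PySem.List.slice_from_natCast,
      List.eraseIdx_eq_take_drop_succ]

lemma pvC2_eq_eraseIdx (vs : List Int) (i : Nat) : pvC2 vs i = vs.eraseIdx i := by
  exact bRemove_eq_eraseIdx vs i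

-- a list with a bad adjacent pair is not valid
lemma bValid_false_of_bad (vs : List Int) (k : Nat) (hk : k + 1 < vs.length)
    (hb : bBad (vs[k]'(by omega), vs[k+1]'(by omega)) = true) : bValid vs = false := by
  by_contra hne
  have hv : bValid vs = true := by
    cases h : bValid vs
    · exact absurd h hne
    · rfl
  rw [bValid, List.all_eq_true] at hv
  have hkz : k < (vs.zip vs.tail).length := by rw [zip_tail_length]; omega
  have hmem := List.getElem_mem hkz
  have := hv _ hmem
  rw [zip_tail_getElem vs k hkz] at this
  simp only [bBad] at hb
  simp at this hb
  omega

-- removing an index away from the first violation cannot make the list valid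
lemma bValid_erase_false (vs : List Int) (i j : Nat) (hi : i + 1 < vs.length)
    (hb : bBad (vs[i]'(by omega), vs[i+1]'(by omega)) = true)
    (hj : j < vs.length) (hji : j ≠ i) (hji1 : j ≠ i + 1) :
    bValid (vs.eraseIdx j) = false := by
  have hlen : (vs.eraseIdx j).length = vs.length - 1 := by
    rw [List.length_eraseIdx, if_pos hj]
  rcases Nat.lt_or_ge j i with hlt | hge
  · -- j < i: the pair sits at indices i-1, i of the erased list
    have hk : (i - 1) + 1 < (vs.eraseIdx j).length := by omega
    apply bValid_false_of_bad _ (i - 1) hk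
    have e1 : (vs.eraseIdx j)[i-1]'(by omega) = vs[i]'(by omega) := by
      rw [List.getElem_eraseIdx, dif_neg (by omega)]
      congr 1; omega
    have e2 : (vs.eraseIdx j)[(i-1)+1]'(by omega) = vs[i+1]'(by omega) := by
      rw [List.getElem_eraseIdx, dif_neg (by omega)]
      congr 1; omega
    rw [e1, e2]; exact hb
  · -- j > i+1: the pair sits at indices i, i+1 of the erased list
    have hgt : i + 1 < j := by omega
    have hk : i + 1 < (vs.eraseIdx j).length := by omega
    apply bValid_false_of_bad _ i hk
    have e1 : (vs.eraseIdx j)[i]'(by omega) = vs[i]'(by omega) := by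
      rw [List.getElem_eraseIdx, dif_pos (by omega)]
    have e2 : (vs.eraseIdx j)[i+1]'(by omega) = vs[i+1]'(by omega) := by
      rw [List.getElem_eraseIdx, dif_pos (by omega)]
    rw [e1, e2]; exact hb

-- the brute force over all removals collapses to the two candidates at the first violation
lemma any_range_eq (vs : List Int) (i : Nat)
    (hf : (vs.zip vs.tail).findIdx? bBad = some i) :
    (List.range vs.length).any (fun j => bValid (bRemove vs j)) =
      (bValid (vs.eraseIdx (i + 1)) || bValid (vs.eraseIdx i)) := by
  obtain ⟨hilt, hbad, -⟩ := List.findIdx?_eq_some_iff_getElem.mp hf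
  rw [zip_tail_length] at hilt
  have hb : bBad (vs[i]'(by omega), vs[i+1]'(by omega)) = true := by
    rw [← zip_tail_getElem vs i (by rw [zip_tail_length]; omega)]
    exact hbad
  have hi1 : i + 1 < vs.length := by omega
  cases h1 : bValid (vs.eraseIdx (i + 1)) with
  | true =>
    simp only [Bool.true_or]
    rw [List.any_eq_true]
    exact ⟨i + 1, by rw [List.mem_range]; omega, by rw [bRemove_eq_eraseIdx]; exact h1⟩
  | false =>
    cases h2 : bValid (vs.eraseIdx i) with
    | true =>
      simp only [Bool.false_or]
      rw [List.any_eq_true]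
      exact ⟨i, by rw [List.mem_range]; omega, by rw [bRemove_eq_eraseIdx]; exact h2⟩
    | false =>
      simp only [Bool.false_or]
      rw [List.any_eq_false]
      intro j hj
      rw [List.mem_range] at hj
      rw [bRemove_eq_eraseIdx]
      by_cases hji : j = i
      · subst hji; simp [h2]
      · by_cases hji1 : j = i + 1
        · subst hji1; simp [h1]
        · simp [bValid_erase_false vs i j hi1 hb hj hji hji1]

-- ===== VERDICT (by name: the statement is the Claim_ definition above) =====
theorem only_decreasing_spec : Claim_equal_only_decreasing := by
  intro values removed _
  unfold Spec_only_decreasing only_decreasing only_decreasing_alt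
  cases removed with
  | true =>
    rw [odGo_true_eq values (values.length - 1 - 0) 0 rfl]
    simp only [List.drop_zero]
    rw [bValid, all_eq_findIdx_isNone]
    cases (values.zip values.tail).findIdx? bBad <;> simp
  | false =>
    rw [odGo_false_eq values (values.length - 1 - 0) 0 rfl]
    simp only [List.drop_zero]
    cases hf : (values.zip values.tail).findIdx? bBad with
    | none =>
      have : bValid values = true := by rw [bValid, all_eq_findIdx_isNone, hf]; rfl
      simp [this]
    | some k =>
      have hv : bValid values = false := by rw [bValid, all_eq_findIdx_isNone, hf]; rfl
      rw [hv, if_neg (by simp), if_neg (by simp), any_range_eq values k hf]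
      simp only [Nat.zero_add, pvC1_eq_eraseIdx, pvC2_eq_eraseIdx]
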